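-- pv_equiv track=rewrite | github.com/AnaLysyk/Quality_Control | ai_applying/__main__.py | _strip_flags
-- ===== SOURCE A (Python) =====
-- from typing import List
--
-- def _strip_flags(argv: List[str], model: str) -> str:
--     cleaned: List[str] = []
--     skip_next = False
--     for idx, value in enumerate(argv):
--         if skip_next:
--             skip_next = False
--             continue
--         if value == "--model":
--             skip_next = True
--             continue
--         if value == model and idx > 0 and argv[idx - 1] == "--model":
--             # already skipped via --model branch
--             continue
--         cleaned.append(value)
--     return " ".join(cleaned).strip()
-- ===== SOURCE B (Python) =====
-- from typing import List
--
--
-- def _run_len(argv: List[str], i: int) -> int: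
--     """Length of the maximal run of '--model' tokens starting at position i."""
--     j = i
--     while j < len(argv) and argv[j] == "--model":
--         j += 1
--     return j - i
--
--
-- def _strip_flags(argv: List[str], model: str) -> str:
--     # Run-length formulation: instead of a running skip_next state machine,
--     # consume each maximal run of "--model" tokens at once; the run's parity
--     # decides whether the token after it is the last flag's argument (odd run:
--     # always consumed) or a kept token (even run: consumed only if == model,
--     # since it then sits right after a skipped "--model").
--     out: List[str] = []
--     i, n = 0, len(argv)
--     while i < n:
--         v = argv[i]
--         if v != "--model":
--             out.append(v)
--             i += 1
--             continue
--         k = _run_len(argv, i)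
--         i += k
--         if k % 2 == 1:
--             i += 1
--         elif i < n and argv[i] == model:
--             i += 1
--     return " ".join(out).strip()
-- ===== Notes on version B (the rewrite author's own statement) =====
-- stated objective: alternative
-- what changed: Replaces the skip_next state machine (with its back-reference to argv[idx-1]) by run-length parsing: each maximal run of '--model' tokens is consumed at once and the run's parity decides whether the following token is the last flag's argument or a kept token.
import Mathlib
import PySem

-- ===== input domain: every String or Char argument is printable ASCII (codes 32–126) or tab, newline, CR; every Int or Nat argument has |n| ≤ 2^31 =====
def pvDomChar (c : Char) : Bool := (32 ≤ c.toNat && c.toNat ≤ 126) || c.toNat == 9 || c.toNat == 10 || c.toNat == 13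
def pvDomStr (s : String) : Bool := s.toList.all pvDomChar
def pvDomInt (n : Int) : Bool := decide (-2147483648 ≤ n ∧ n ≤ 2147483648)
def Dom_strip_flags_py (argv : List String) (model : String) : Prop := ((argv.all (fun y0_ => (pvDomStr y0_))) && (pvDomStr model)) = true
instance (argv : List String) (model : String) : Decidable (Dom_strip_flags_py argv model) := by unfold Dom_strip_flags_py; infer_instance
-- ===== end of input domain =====

-- B replaces A's skip_next state machine by run-length parsing of maximal "--model" runs
-- (objective: alternative, same O(n) cost; return values proved equal on all inputs).

-- ===== PORT A =====
-- the for loop over enumerate(argv) with state (cleaned, skip_next) becomes structural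
-- recursion over the remaining suffix carrying idx and skip_next; cleaned is built by cons.
-- Python's argv[idx - 1] is read only when 'idx > 0' already held (and-short-circuit), and
-- idx < len(argv) inside the loop, so the index is in range and List.getD is exact there.
def aGo (argv : List String) (model : String) : List String → Nat → Bool → List String
  | [], _, _ => []
  | v :: rest, idx, skip =>
    if skip then aGo argv model rest (idx + 1) false
    else if v == "--model" then aGo argv model rest (idx + 1) true
    else if v == model && decide (0 < idx) && (argv.getD (idx - 1) "" == "--model") then
      aGo argv model rest (idx + 1) false
    else v :: aGo argv model rest (idx + 1) false

def strip_flags_py (argv : List String) (model : String) : String :=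
  PySem.Str.strip (PySem.Str.join " " (aGo argv model argv 0 false))

-- ===== PORT B =====
-- _run_len(argv, i): the inner while loop counting the run of "--model" tokens from
-- position i, transcribed as recursion on the suffix argv[i:]
def runLen : List String → Nat
  | [] => 0
  | v :: r => if v == "--model" then runLen r + 1 else 0

-- Source B's while loop over the cursor i becomes recursion on the remaining suffix
-- rest = argv[i:] (out.append(v) becomes cons; i += k becomes drop k)
def bGo (model : String) : List String → List String
  | [] => []
  | v :: r =>
    if _h : v = "--model" then
      let k := runLen (v :: r)
      let rest := (v :: r).drop k
      if k % 2 == 1 then bGo model (rest.drop 1)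
      else if rest.head? == some model then bGo model (rest.drop 1)
      else bGo model rest
    else v :: bGo model r
  termination_by l => l.length
  decreasing_by
  · simp only [List.length_drop]
    have hk : 1 ≤ runLen (v :: r) := by simp [runLen, _h]
    simp only [List.length_cons]
    omega
  · simp only [List.length_drop]
    have hk : 1 ≤ runLen (v :: r) := by simp [runLen, _h]
    simp only [List.length_cons]
    omega
  · simp only [List.length_drop]
    have hk : 1 ≤ runLen (v :: r) := by simp [runLen, _h]
    simp only [List.length_cons]
    omega
  · simp

def strip_flags_py_alt (argv : List String) (model : String) : String :=
  PySem.Str.strip (PySem.Str.join " " (bGo model argv))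

-- ===== PRECONDITION & SPEC =====
def Spec_strip_flags_py (argv : List String) (model : String) (out : String) : Prop := out = strip_flags_py_alt argv model
instance (argv : List String) (model : String) (out : String) : Decidable (Spec_strip_flags_py argv model out) := by unfold Spec_strip_flags_py; infer_instance

-- ===== CLAIM (what is proved, stated in full; the proofs are below) =====
def Claim_equal_strip_flags_py : Prop := ∀ (argv : List String) (model : String), Dom_strip_flags_py argv model → Spec_strip_flags_py argv model (strip_flags_py argv model)

-- ===== LEMMAS AND PROOFS =====

-- intermediate semantics of A's loop: the absolute index idx is replaced by the previous
-- element (the only thing A's third branch reads back)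
def gsem (model : String) : Option String → Bool → List String → List String
  | _, _, [] => []
  | _, true, v :: r => gsem model (some v) false r
  | prev, false, v :: r =>
    if v == "--model" then gsem model (some v) true r
    else if v == model && (prev == some "--model") then gsem model (some v) false r
    else v :: gsem model (some v) false r

lemma gsem_true_prev (model : String) (p q : Option String) (rest : List String) :
    gsem model p true rest = gsem model q true rest := by
  cases rest <;> rfl

lemma aGo_eq_gsem (argv : List String) (model : String) :
    ∀ rest idx skip, argv.drop idx = rest →
      aGo argv model rest idx skip =
        gsem model (if idx = 0 then none else argv[idx - 1]?) skip rest := by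
  intro rest
  induction rest with
  | nil => intro idx skip _; cases skip <;> rfl
  | cons v r ih =>
    intro idx skip hdrop
    have hlt : idx < argv.length := by
      by_contra hge
      have : argv.drop idx = [] := List.drop_eq_nil_of_le (by omega)
      rw [this] at hdrop; exact (List.cons_ne_nil v r) hdrop.symm
    have hget : argv[idx]? = some v := by
      have : (argv.drop idx)[0]? = argv[idx + 0]? := List.getElem?_drop
      rw [hdrop] at this; simpa using this.symm
    have hdrop' : argv.drop (idx + 1) = r := by
      have : List.drop 1 (List.drop idx argv) = List.drop (idx + 1) argv := List.drop_drop
      rw [← this, hdrop]; rfl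
    have ihr := ih (idx + 1)
    have hprev' : (if idx + 1 = 0 then none else argv[idx + 1 - 1]?) = some v := by
      simp [hget]
    cases skip with
    | true =>
      have h1 : aGo argv model (v :: r) idx true = aGo argv model r (idx + 1) false := by
        simp [aGo]
      rw [h1, ihr false hdrop', hprev']
      rfl
    | false =>
      -- the two third-branch conditions agree
      have hcond : (decide (0 < idx) && (argv.getD (idx - 1) "" == "--model"))
          = ((if idx = 0 then none else argv[idx - 1]?) == some "--model") := by
        by_cases h0 : idx = 0
        · subst h0; simp
        · have h1 : idx - 1 < argv.length := by omega
          simp only [if_neg h0, decide_eq_true (by omega : 0 < idx), Bool.true_and]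
          rw [List.getD_eq_getElem?_getD, List.getElem?_eq_getElem h1]
          simp
      simp only [aGo, gsem]
      by_cases hM : v == "--model"
      · simp only [hM, if_true]
        rw [ihr true hdrop', gsem_true_prev model _ (some v)]
        simp
      · simp only [hM, Bool.false_eq_true, if_false]
        rw [Bool.and_assoc, hcond]
        by_cases hc : (v == model && ((if idx = 0 then none else argv[idx - 1]?) == some "--model")) = true
        · simp only [hc, if_true]
          rw [ihr false hdrop', hprev']
        · simp only [hc, Bool.false_eq_true, if_false]
          rw [ihr false hdrop', hprev']

-- runLen facts
lemma runLen_le (l : List String) : runLen l ≤ l.length := by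
  induction l with
  | nil => simp [runLen]
  | cons v r ih => simp only [runLen, List.length_cons]; split <;> omega

lemma take_runLen (l : List String) : l.take (runLen l) = List.replicate (runLen l) "--model" := by
  induction l with
  | nil => simp [runLen]
  | cons v r ih =>
    simp only [runLen]
    split
    · next h => simp [List.replicate_succ, List.take_succ_cons, ih, (by simpa using h : v = "--model")]
    · simp

lemma head?_drop_runLen (l : List String) : (l.drop (runLen l)).head? ≠ some "--model" := by
  induction l with
  | nil => simp [runLen]
  | cons v r ih =>
    simp only [runLen]
    split
    · simpa using ih
    · next h => simpa using fun hv => h (by simp [hv])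

lemma runLen_decomp (l : List String) :
    List.replicate (runLen l) "--model" ++ l.drop (runLen l) = l := by
  rw [← take_runLen]; exact List.take_append_drop _ _

-- skipping through a run of j "--model" tokens from the skip state: parity decides
lemma gsem_true_run (model : String) :
    ∀ j (p : Option String) (rest : List String),
      gsem model p true (List.replicate j "--model" ++ rest) =
        if j % 2 == 1 then gsem model (some "--model") false rest
        else gsem model p true rest := by
  intro j
  induction j using Nat.strong_induction_on with
  | _ j ih =>
    intro p rest
    match j with
    | 0 => simp
    | 1 => simp [gsem]
    | (n + 2) =>
      have h1 : (n + 2) % 2 = n % 2 := by omega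
      simp only [List.replicate_succ, List.cons_append, gsem, beq_self_eq_true, if_true]
      rw [ih n (by omega)]
      rw [h1]
      split
      · rfl
      · exact gsem_true_prev model _ p _

-- the main equivalence of the two loop semantics, by fuel on the list length
lemma gsem_eq_bGo (model : String) :
    ∀ n (l : List String) (prev : Option String), l.length ≤ n →
      prev ≠ some "--model" → gsem model prev false l = bGo model l := by
  intro n
  induction n with
  | zero =>
    intro l prev hlen _
    have : l = [] := List.eq_nil_of_length_eq_zero (by omega)
    subst this; simp [gsem, bGo]
  | succ n ih =>
    intro l prev hlen hprev
    match l with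
    | [] => simp [gsem, bGo]
    | v :: r =>
      by_cases hM : v = "--model"
      · subst hM
        -- decompose into the maximal run and the remainder
        set k := runLen ("--model" :: r) with hk
        have hk1 : 1 ≤ k := by simp [hk, runLen]
        set rest := ("--model" :: r).drop k with hrest
        have hresthead : rest.head? ≠ some "--model" := head?_drop_runLen _
        have hrestlen : rest.length ≤ n := by
          have := runLen_le ("--model" :: r)
          simp only [hrest, List.length_drop, List.length_cons] at *
          omega
        have hdec : List.replicate k "--model" ++ rest = "--model" :: r := runLen_decomp _
        -- left side: one flag step, then the run lemma on the remaining k-1 flags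
        have hrep : ("--model" :: r) = "--model" :: (List.replicate (k - 1) "--model" ++ rest) := by
          obtain ⟨m, hm⟩ : ∃ m, k = m + 1 := ⟨k - 1, by omega⟩
          conv_lhs => rw [← hdec, hm, List.replicate_succ, List.cons_append]
          simp [hm]
        rw [hrep]
        have hgstep : gsem model prev false
            ("--model" :: (List.replicate (k - 1) "--model" ++ rest)) =
            gsem model (some "--model") true (List.replicate (k - 1) "--model" ++ rest) := by
          simp [gsem]
        rw [hgstep, gsem_true_run]
        -- right side
        rw [← hrep]
        rw [bGo, dif_pos rfl]
        simp only [← hrest, ← hk]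
        have hpar : ((k - 1) % 2 == 1) = !(k % 2 == 1) := by
          rcases Nat.even_or_odd k with he | ho
          · have h2 : k % 2 = 0 := Nat.even_iff.mp he
            have h3 : (k - 1) % 2 = 1 := by omega
            simp [h2, h3]
          · have h2 : k % 2 = 1 := Nat.odd_iff.mp ho
            have h3 : (k - 1) % 2 = 0 := by omega
            simp [h2, h3]
        rw [hpar]
        by_cases hkp : (k % 2 == 1) = true
        · -- odd run: the token after the run is skipped
          simp only [hkp, Bool.not_true, Bool.false_eq_true, if_false, if_true]
          match hr : rest with
          | [] => simp [gsem, bGo]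
          | w :: r' =>
            have hw : w ≠ "--model" := by
              intro hww; exact hresthead (by simp [hww])
            have : gsem model (some "--model") true (w :: r') = gsem model (some w) false r' := rfl
            rw [this, ih r' (some w) (by simp at hrestlen; omega) (by simpa using hw)]
            simp
        · -- even run: the token after the run sits after a skipped "--model"
          simp only [hkp, Bool.not_false, if_true, Bool.false_eq_true, if_false]
          match hr : rest with
          | [] => simp [gsem, bGo]
          | w :: r' =>
            have hw : w ≠ "--model" := by
              intro hww; exact hresthead (by simp [hww])
            have hr'len : r'.length ≤ n := by simp at hrestlen; omega
            simp only [gsem, beq_iff_eq, if_neg hw]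
            by_cases hwm : w = model
            · simp only [hwm, beq_self_eq_true, if_true, List.head?_cons,
                List.drop_succ_cons, List.drop_zero]
              exact ih r' (some model) hr'len (by simpa [← hwm] using hw)
            · have hwb : (w == model) = false := by simpa using hwm
              simp only [hwb, if_false, List.head?_cons,
                Option.some.injEq, hwm]
              rw [ih r' (some w) hr'len (by simpa using hw)]
              rw [bGo]
              simp [hw]
      · -- ordinary token: both keep it
        have hgv : gsem model prev false (v :: r) = v :: gsem model (some v) false r := by
          have h1 : (v == "--model") = false := by simpa using hM
          have h2 : (prev == some "--model") = false := by
            simp only [beq_eq_false_iff_ne]; exact hprev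
          simp [gsem, h1, h2]
        rw [hgv, ih r (some v) (by simp at hlen; omega) (by simpa using hM)]
        rw [bGo]
        simp [hM]

lemma go_eq (argv : List String) (model : String) :
    aGo argv model argv 0 false = bGo model argv := by
  rw [aGo_eq_gsem argv model argv 0 false (by simp)]
  exact gsem_eq_bGo model argv.length argv none le_rfl (by simp)

-- ===== VERDICT (by name: the statement is the Claim_ definition above) =====
theorem strip_flags_py_spec : Claim_equal_strip_flags_py := by
  intro argv model _
  unfold Spec_strip_flags_py strip_flags_py strip_flags_py_alt
  rw [go_eq]
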